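-- pv_equiv track=rewrite | github.com/kmm2001/comp110-22f-workspace | exercises/quiz_practice.py | odd_and_even2
-- ===== SOURCE A (Python) =====
-- def odd_and_even2(list1: list[int]) -> list[int]:
--     """Find the odd elements with even indexes."""
--     i: int = 0
--     list2: list[int] = []
--     for item in list1:
--         if item % 2 ==1 and i % 2 == 0:
--             list2.append(list1[i])
--         i = i + 1
--     return list2
-- ===== SOURCE B (Python) =====
-- def odd_and_even2(list1: list[int]) -> list[int]:
--     """Find the odd elements with even indexes."""
--     even = list1[::2]
--     return [x for x in even if x % 2 == 1]
-- ===== Notes on version B (the rewrite author's own statement) =====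
-- stated objective: simpler
-- what changed: B first extracts the even-index subsequence with the stride slice list1[::2], then filters it for odd values in one comprehension, eliminating A's running index counter, per-element parity test and list1[i] re-indexing inside the loop.
import Mathlib
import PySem

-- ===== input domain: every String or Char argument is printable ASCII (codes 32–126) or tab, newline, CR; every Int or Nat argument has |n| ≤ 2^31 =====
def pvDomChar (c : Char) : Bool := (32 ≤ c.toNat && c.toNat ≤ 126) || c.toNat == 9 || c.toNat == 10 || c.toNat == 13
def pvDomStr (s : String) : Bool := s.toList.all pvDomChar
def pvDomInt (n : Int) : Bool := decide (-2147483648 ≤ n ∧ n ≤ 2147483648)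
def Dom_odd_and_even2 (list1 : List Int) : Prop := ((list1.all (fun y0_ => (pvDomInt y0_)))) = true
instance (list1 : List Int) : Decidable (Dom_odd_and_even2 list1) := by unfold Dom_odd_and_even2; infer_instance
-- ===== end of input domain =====

-- B replaces A's indexed loop with a stride slice list1[::2] followed by a single odd-filter pass (simpler; same return value).

-- ===== PORT A =====
-- the for-loop of A, carrying the running index i and the accumulator list2
def pvALoop (list1 : List Int) : List Int → Int → List Int → List Int
  | [], _, list2 => list2
  | item :: rest, i, list2 =>
    let list2' :=
      if PySem.Int.mod item 2 == 1 && PySem.Int.mod i 2 == 0 then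
        match PySem.List.pyGet? list1 i with   -- list1[i]; always in range in A
        | some v => list2 ++ [v]
        | none => list2
      else list2
    pvALoop list1 rest (i + 1) list2'

def odd_and_even2 (list1 : List Int) : List Int :=
  pvALoop list1 list1 0 []

-- ===== PORT B =====
def odd_and_even2_alt (list1 : List Int) : List Int :=
  let even := (PySem.List.slice? list1 none none 2).getD []   -- list1[::2]; step 2 ≠ 0, never none
  even.filter (fun x => PySem.Int.mod x 2 == 1)

-- ===== PRECONDITION & SPEC =====
def Spec_odd_and_even2 (list1 : List Int) (out : List Int) : Prop := out = odd_and_even2_alt list1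
instance (list1 : List Int) (out : List Int) : Decidable (Spec_odd_and_even2 list1 out) := by unfold Spec_odd_and_even2; infer_instance

-- ===== CLAIM (what is proved, stated in full; the proofs are below) =====
def Claim_equal_odd_and_even2 : Prop := ∀ (list1 : List Int), Dom_odd_and_even2 list1 → Spec_odd_and_even2 list1 (odd_and_even2 list1)

-- ===== LEMMAS AND PROOFS =====

-- the even-index subsequence of a list
def pvEveryOther : List Int → List Int
  | [] => []
  | [x] => [x]
  | x :: _ :: rest => x :: pvEveryOther rest

-- parity-alternating reference collector: keeps odd values at positions where b is true
def pvSpec2 : List Int → Bool → List Int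
  | [], _ => []
  | x :: r, b => (if b && (PySem.Int.mod x 2 == 1) then [x] else []) ++ pvSpec2 r (!b)

theorem pvFmod_natCast (n : Nat) : PySem.Int.mod (n : Int) 2 = ((n % 2 : Nat) : Int) := by
  simp only [PySem.Int.mod, Int.fmod_eq_emod]
  omega

theorem pvALoop_spec (list1 : List Int) :
    ∀ (rest : List Int) (n : Nat) (acc : List Int), list1.drop n = rest →
      pvALoop list1 rest (n : Int) acc = acc ++ pvSpec2 rest (n % 2 == 0) := by
  intro rest
  induction rest with
  | nil => intro n acc _; simp [pvALoop, pvSpec2]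
  | cons item rest' ih =>
    intro n acc hdrop
    have hget : list1[n]? = some item := by
      have h0 : (list1.drop n)[0]? = list1[n + 0]? := List.getElem?_drop
      rw [hdrop] at h0; simpa using h0.symm
    have hdrop' : list1.drop (n + 1) = rest' := by
      have : list1.drop (n+1) = (list1.drop n).drop 1 := by
        rw [List.drop_drop]
      rw [this, hdrop]; simp
    have hcast : (n : Int) + 1 = ((n + 1 : Nat) : Int) := by push_cast; ring
    simp only [pvALoop, PySem.List.pyGet?_natCast, hget, hcast]
    rw [ih (n+1) _ hdrop']
    have hpar : ((n + 1) % 2 == 0) = !(n % 2 == 0) := by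
      rcases Nat.mod_two_eq_zero_or_one n with h | h <;> simp [Nat.add_mod, h]
    rw [hpar, pvSpec2, pvFmod_natCast]
    rcases Nat.mod_two_eq_zero_or_one n with h | h <;>
      cases hb : (PySem.Int.mod item 2 == 1) <;>
      simp [h, hb]

-- list1[::2] is the even-index subsequence
theorem pvFilterMap_range (xs : List Int) :
    List.filterMap (fun k => xs[2 * k]?) (List.range ((xs.length + 1) / 2)) = pvEveryOther xs := by
  induction xs using pvEveryOther.induct with
  | case1 => simp [pvEveryOther]
  | case2 x => simp [pvEveryOther]
  | case3 x y rest ih =>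
    have hlen : ((x :: y :: rest).length + 1) / 2 = (rest.length + 1) / 2 + 1 := by
      simp [List.length_cons]; omega
    rw [hlen, List.range_succ_eq_map, List.filterMap_cons, List.filterMap_map]
    have h0 : (x :: y :: rest)[2 * 0]? = some x := rfl
    rw [h0]
    have : (fun k => (x :: y :: rest)[2 * (k + 1)]?) = (fun k => rest[2 * k]?) := by
      funext k
      have h2 : 2 * (k + 1) = 2 * k + 1 + 1 := by omega
      simp [h2]
    rw [Function.comp_def]
    simp only [this]
    rw [ih]
    rfl

theorem pvSlice2 (xs : List Int) :
    PySem.List.slice? xs none none 2 = some (pvEveryOther xs) := by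
  have h2 : (2 : Int) ≠ 0 := by norm_num
  simp only [PySem.List.slice?, PySem.List.sliceIndices, if_neg h2]
  norm_num
  have hcount : (if 0 < xs.length then (((xs.length : Int) + 2 - 1) / 2).toNat else 0) = (xs.length + 1) / 2 := by
    split_ifs with h <;> omega
  rw [hcount]
  have hfun : (fun k : Nat => xs[((2 : Int) * (k : Int)).toNat]?) = (fun k : Nat => xs[2 * k]?) := by
    funext k
    have hk : ((2 : Int) * (k : Int)).toNat = 2 * k := by omega
    rw [hk]
  simp only [hfun]
  exact pvFilterMap_range xs

theorem pvAlt_eq (list1 : List Int) :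
    odd_and_even2_alt list1 = (pvEveryOther list1).filter (fun x => PySem.Int.mod x 2 == 1) := by
  simp [odd_and_even2_alt, pvSlice2]

theorem pvSpec2_eq (xs : List Int) :
    pvSpec2 xs true = (pvEveryOther xs).filter (fun x => PySem.Int.mod x 2 == 1) := by
  induction xs using pvEveryOther.induct with
  | case1 => simp [pvSpec2, pvEveryOther]
  | case2 x =>
    simp only [pvSpec2, List.filter]
    cases hb : (PySem.Int.mod x 2 == 1) <;>
      rw [PySem.Int.mod_eq_emod_of_pos (by norm_num)] at hb <;>
      simp [pvEveryOther, List.filter, hb]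
  | case3 x y rest ih =>
    simp only [pvSpec2, pvEveryOther, List.filter, ih, Bool.not_true, Bool.not_false,
      Bool.false_and, if_neg Bool.false_ne_true, List.nil_append]
    cases hb : (PySem.Int.mod x 2 == 1) <;>
      rw [PySem.Int.mod_eq_emod_of_pos (by norm_num)] at hb <;>
      simp [List.filter, hb]

-- ===== VERDICT (by name: the statement is the Claim_ definition above) =====
theorem odd_and_even2_spec : Claim_equal_odd_and_even2 := by
  intro list1 _
  unfold Spec_odd_and_even2 odd_and_even2
  have h := pvALoop_spec list1 list1 0 [] (by simp)
  simp only [Nat.cast_zero] at h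
  rw [h, pvAlt_eq, ← pvSpec2_eq]
  rfl
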